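-- pv_equiv track=rewrite | github.com/16yo/DM | rgr/rgr_2/perm_long.py | parse
-- ===== SOURCE A (Python) =====
-- N = 8
--
-- def make_perm(s: str):
--     m = dict({})
--
--     for i in range(1, N + 1):
--         c = str(i)
--         j = s.find(c)
--         if j != -1:
--             if j < len(s) - 1:
--                 m.update({ c : s[s.find(c) + 1]})
--             else:
--                 m.update({ c : s[0] })
--         else:
--             m.update({ c : c })
--     return m
--
-- def parse(s: str):
--     s = s.replace('(', '')
--     l = s.split(')')
--     l.remove('')
--     p = []
--     for i in l:
--         p.append(make_perm(i))
--     return p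
-- ===== SOURCE B (Python) =====
-- N = 8
--
-- def make_perm(s: str):
--     n = len(s)
--     nxt = {}
--     for k, c in enumerate(s):
--         if c not in nxt:
--             nxt[c] = s[(k + 1) % n]
--     return {str(i): nxt.get(str(i), str(i)) for i in range(1, N + 1)}
--
-- def parse(s: str):
--     groups = s.replace('(', '').split(')')
--     groups.remove('')
--     return [make_perm(g) for g in groups]
-- ===== Notes on version B (the rewrite author's own statement) =====
-- stated objective: alternative
-- what changed: make_perm now builds a successor map in one adjacency pass over the cycle string (first occurrence wins, wrap-around via (k+1)%n) and then reads the eight digits out of it, instead of running eight separate s.find scans with explicit last-position branching; parse becomes a comprehension.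
import Mathlib
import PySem

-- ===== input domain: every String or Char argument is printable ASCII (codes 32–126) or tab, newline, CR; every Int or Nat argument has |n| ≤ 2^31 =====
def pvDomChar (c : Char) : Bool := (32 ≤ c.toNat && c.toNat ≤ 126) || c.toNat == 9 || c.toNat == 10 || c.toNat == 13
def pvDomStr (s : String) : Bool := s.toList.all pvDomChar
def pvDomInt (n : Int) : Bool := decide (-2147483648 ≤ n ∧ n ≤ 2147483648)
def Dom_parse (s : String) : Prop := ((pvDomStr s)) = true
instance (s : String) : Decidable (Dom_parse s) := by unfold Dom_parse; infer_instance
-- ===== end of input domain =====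

-- B replaces make_perm's eight s.find scans by one adjacency pass that records each character's
-- first-occurrence successor (wrap-around via (k+1)%n) and then reads the eight digits out of that map;
-- objective: alternative decomposition, same cost class.

-- ===== PORT A =====
-- make_perm: eight probes i = 1..8, each with its own s.find scan and last-position branching.
def makePerm (s : String) : PySem.Dict String String :=
  (PySem.List.pyRange 1 9 1).foldl (fun m i =>
    let c := PySem.Int.toStr i
    let j := PySem.Str.find s c
    if j ≠ -1 then
      if j < PySem.Str.len s - 1 then
        -- m.update({c : s[s.find(c) + 1]}); the index is in range here, so pyGetD is exact
        m.insert c (String.ofList [PySem.List.pyGetD s.toList (PySem.Str.find s c + 1) ' '])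
      else
        m.insert c (String.ofList [PySem.List.pyGetD s.toList 0 ' '])
    else
      m.insert c c) PySem.Dict.empty

def parse (s : String) : List (List (String × String)) :=
  let s1 := PySem.Str.replace s "(" ""
  match PySem.Str.split? s1 ")" with
  | none => []      -- unreachable: the separator ")" is nonempty
  | some l =>
    match PySem.List.remove? l "" with
    | none => []    -- Python raises ValueError('' not in list) here; excluded by Pre_parse
    | some l2 => l2.foldl (fun p i => p ++ [(makePerm i).items]) []

-- ===== PORT B =====
-- one pass: nxt maps each character (first occurrence wins) to its cyclic successor
def nxtDict (cs : List Char) : PySem.Dict String String :=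
  (PySem.List.enumerate cs 0).foldl
    (fun d kc =>
      if d.contains (String.ofList [kc.2]) then d
      else d.insert (String.ofList [kc.2])
             -- s[(k + 1) % n]: the index is in range here, so pyGetD is exact
             (String.ofList [PySem.List.pyGetD cs (PySem.Int.mod (kc.1 + 1) (PySem.List.len cs)) ' ']))
    PySem.Dict.empty

def makePermAlt (s : String) : PySem.Dict String String :=
  let nxt := nxtDict s.toList
  PySem.Dict.mk ((PySem.List.pyRange 1 9 1).map (fun i =>
    (PySem.Int.toStr i, nxt.getD (PySem.Int.toStr i) (PySem.Int.toStr i))))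

def parse_alt (s : String) : List (List (String × String)) :=
  let s1 := PySem.Str.replace s "(" ""
  match PySem.Str.split? s1 ")" with
  | none => []      -- unreachable: the separator ")" is nonempty
  | some groups =>
    match PySem.List.remove? groups "" with
    | none => []    -- Python raises ValueError here; excluded by Pre_parse
    | some gs => gs.map (fun g => (makePermAlt g).items)

-- ===== PRECONDITION & SPEC =====
-- Pre_parse: exactly the inputs on which A's groups.remove('') succeeds, i.e. some piece of the
-- ')'-split is empty; elsewhere Python A raises ValueError.
def Pre_parse (s : String) : Prop :=
  "" ∈ (PySem.Str.split? (PySem.Str.replace s "(" "") ")").getD []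
instance (s : String) : Decidable (Pre_parse s) := by unfold Pre_parse; infer_instance
def pvWitness_parse : String := "(12)(345)"

def Spec_parse (s : String) (out : List (List (String × String))) : Prop := out = parse_alt s
instance (s : String) (out : List (List (String × String))) : Decidable (Spec_parse s out) := by unfold Spec_parse; infer_instance

-- ===== CLAIM (what is proved, stated in full; the proofs are below) =====
def Claim_equal_parse : Prop := ∀ (s : String), Dom_parse s → Pre_parse s → Spec_parse s (parse s)

-- ===== LEMMAS AND PROOFS =====

theorem ofList_singleton_inj (a b : Char) : String.ofList [a] = String.ofList [b] ↔ a = b := by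
  constructor
  · intro h; have := congrArg String.toList h; simpa using this
  · rintro rfl; rfl

theorem singleton_prefix_iff (t : Char) (l : List Char) : [t] <+: l ↔ l[0]? = some t := by
  cases l <;> simp [List.cons_prefix_cons, eq_comm]

-- Chars.find of a single character is the index of its first occurrence.
theorem find_singleton (cs : List Char) (t : Char) :
    PySem.Chars.find cs [t]
      = (match PySem.List.index? cs t with | none => -1 | some k => (k : Int)) := by
  cases hi : PySem.List.index? cs t with
  | none =>
    have hnm : t ∉ cs := (PySem.List.index?_eq_none_iff cs t).mp hi
    exact (PySem.Chars.find_eq_neg_one_iff cs [t]).mpr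
      (fun h => hnm ((List.singleton_infix_iff t cs).mp h))
  | some k =>
    obtain ⟨pre, suf, hcs, hlen, hpre⟩ := (PySem.List.index?_eq_some_iff cs t k).mp hi
    have hmem : t ∈ cs := by rw [hcs]; exact List.mem_append_right _ (List.mem_cons_self)
    have hnonneg : 0 ≤ PySem.Chars.find cs [t] :=
      (PySem.Chars.find_nonneg_iff cs [t]).mpr ((List.singleton_infix_iff t cs).mpr hmem)
    obtain ⟨hfst, hmin⟩ := PySem.Chars.find_spec hnonneg
    set j := (PySem.Chars.find cs [t]).toNat with hj
    have hk_pref : [t] <+: cs.drop k := by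
      rw [hcs, ← hlen, List.drop_left]; exact ⟨suf, rfl⟩
    have hjk : (PySem.Chars.find cs [t]).toNat ≤ k := not_lt.mp (fun h => hmin k h hk_pref)
    have hkj : ¬ (PySem.Chars.find cs [t]).toNat < k := by
      intro h
      have h0 : cs[j]? = some t := by
        have := (singleton_prefix_iff t _).mp hfst
        simpa [List.getElem?_drop] using this
      rw [hcs, List.getElem?_append_left (by omega : j < pre.length)] at h0
      exact hpre (List.mem_of_getElem? h0)
    show PySem.Chars.find cs [t] = (k : Int)
    omega

-- invariant of B's adjacency pass
theorem nxt_inv (cs : List Char) (t : Char) :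
    ∀ (suf : List Char) (b : ℕ) (d : PySem.Dict String String),
      ((PySem.List.enumerate suf (b : Int)).foldl
        (fun d kc =>
          if d.contains (String.ofList [kc.2]) then d
          else d.insert (String.ofList [kc.2])
                 (String.ofList [PySem.List.pyGetD cs (PySem.Int.mod (kc.1 + 1) (PySem.List.len cs)) ' ']))
        d).get? (String.ofList [t])
      = (d.get? (String.ofList [t])).or
          ((PySem.List.index? suf t).map (fun k =>
            String.ofList [PySem.List.pyGetD cs (PySem.Int.mod (((b + k : ℕ) : Int) + 1) (PySem.List.len cs)) ' '])) := by
  intro suf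
  induction suf with
  | nil =>
    intro b d
    simp [PySem.List.enumerate, PySem.List.index?_eq_idxOf?]
  | cons c' suf ih =>
    intro b d
    rw [PySem.List.enumerate_cons, List.foldl_cons]
    dsimp only
    rw [show ((b : Int) + 1) = ((b + 1 : ℕ) : Int) by push_cast; ring]
    by_cases hc : d.contains (String.ofList [c']) = true
    · rw [if_pos hc, ih (b + 1) d]
      obtain ⟨v, hv⟩ : ∃ v, d.get? (String.ofList [c']) = some v := by
        have h2 := PySem.Dict.contains_eq_isSome_get? d (String.ofList [c'])
        rw [hc] at h2
        exact Option.isSome_iff_exists.mp h2.symm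
      by_cases hct : c' = t
      · subst hct; simp [hv]
      · rw [PySem.List.index?_cons_of_ne _ hct]
        have hshift : ∀ k : ℕ, b + 1 + k = b + (k + 1) := by omega
        simp [Option.map_map, Function.comp_def, hshift]
    · rw [if_neg hc, ih (b + 1) _]
      have hnone : d.get? (String.ofList [c']) = none := by
        cases ho : d.get? (String.ofList [c']) with
        | none => rfl
        | some v =>
          exact absurd (by rw [PySem.Dict.contains_eq_isSome_get?, ho]; rfl) hc
      by_cases hct : c' = t
      · subst hct
        rw [PySem.Dict.get?_insert_self, PySem.List.index?_cons_self, hnone]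
        simp
      · have hne : String.ofList [t] ≠ String.ofList [c'] :=
          fun h => hct (((ofList_singleton_inj t c').mp h).symm)
        rw [PySem.Dict.get?_insert_of_ne _ _ hne, PySem.List.index?_cons_of_ne _ hct]
        have hshift : ∀ k : ℕ, b + 1 + k = b + (k + 1) := by omega
        simp [Option.map_map, Function.comp_def, hshift]

theorem nxtDict_get? (cs : List Char) (t : Char) :
    (nxtDict cs).get? (String.ofList [t])
      = (PySem.List.index? cs t).map (fun k =>
          String.ofList [PySem.List.pyGetD cs (PySem.Int.mod ((k : Int) + 1) (PySem.List.len cs)) ' ']) := by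
  have h := nxt_inv cs t cs 0 PySem.Dict.empty
  unfold nxtDict
  exact h.trans (by cases hi : List.idxOf? t cs <;> simp [PySem.List.index?_eq_idxOf?, hi])

-- the per-digit entry of A equals B's lookup
theorem entry_eq (s : String) (t : Char) :
    (let j := PySem.Str.find s (String.ofList [t])
     if j ≠ -1 then
       if j < PySem.Str.len s - 1 then
         String.ofList [PySem.List.pyGetD s.toList (PySem.Str.find s (String.ofList [t]) + 1) ' ']
       else
         String.ofList [PySem.List.pyGetD s.toList 0 ' ']
     else String.ofList [t])
    = (nxtDict s.toList).getD (String.ofList [t]) (String.ofList [t]) := by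
  have hfind : PySem.Str.find s (String.ofList [t]) = PySem.Chars.find s.toList [t] := by
    rw [PySem.Str.find_eq, String.toList_ofList]
  dsimp only
  rw [PySem.Dict.getD_eq_get?_getD, nxtDict_get? s.toList t]
  cases hi : PySem.List.index? s.toList t with
  | none =>
    have hf : PySem.Chars.find s.toList [t] = -1 := by rw [find_singleton, hi]
    simp [hf]
  | some k =>
    have hk : k < s.toList.length := by
      obtain ⟨pre, suf, hcs, hlen, _⟩ := (PySem.List.index?_eq_some_iff s.toList t k).mp hi
      rw [hcs, List.length_append, List.length_cons, hlen]; omega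
    have hf : PySem.Chars.find s.toList [t] = (k : Int) := by rw [find_singleton, hi]
    have hn : (0 : Int) < (s.toList.length : Int) := by exact_mod_cast Nat.pos_of_ne_zero (by omega)
    rw [hfind, hf, PySem.Str.len_eq, if_pos (show ((k : Int)) ≠ -1 by omega)]
    by_cases hlt : k + 1 < s.toList.length
    · have hmod : PySem.Int.mod ((k : Int) + 1) ((s.toList.length : Int)) = (k : Int) + 1 := by
        rw [PySem.Int.mod_eq_emod_of_pos hn]
        exact Int.emod_eq_of_lt (by omega) (by omega)
      rw [if_pos (show ((k : Int)) < (s.toList.length : Int) - 1 by omega)]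
      have hmod' := hmod; simp only [String.length_toList] at hmod'
      simp [hmod']
    · have hmod : PySem.Int.mod ((k : Int) + 1) ((s.toList.length : Int)) = 0 := by
        rw [PySem.Int.mod_eq_emod_of_pos hn,
          show ((k : Int) + 1) = ((s.toList.length : Int)) by omega, Int.emod_self]
      rw [if_neg (show ¬ ((k : Int)) < (s.toList.length : Int) - 1 by omega)]
      have hmod' := hmod; simp only [String.length_toList] at hmod'
      simp [hmod']

-- A's per-digit entry, named for the proof
def entryA (s : String) (c : String) : String :=
  let j := PySem.Str.find s c
  if j ≠ -1 then
    if j < PySem.Str.len s - 1 then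
      String.ofList [PySem.List.pyGetD s.toList (PySem.Str.find s c + 1) ' ']
    else
      String.ofList [PySem.List.pyGetD s.toList 0 ' ']
  else c

theorem makePerm_eq (s : String) : makePerm s = makePermAlt s := by
  unfold makePerm makePermAlt
  have hfun : (fun (m : PySem.Dict String String) (i : Int) =>
      let c := PySem.Int.toStr i
      let j := PySem.Str.find s c
      if j ≠ -1 then
        if j < PySem.Str.len s - 1 then
          m.insert c (String.ofList [PySem.List.pyGetD s.toList (PySem.Str.find s c + 1) ' '])
        else
          m.insert c (String.ofList [PySem.List.pyGetD s.toList 0 ' '])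
      else
        m.insert c c)
      = (fun m i => m.insert (PySem.Int.toStr i) (entryA s (PySem.Int.toStr i))) := by
    funext m i
    dsimp only [entryA]
    split_ifs <;> rfl
  rw [hfun]
  apply PySem.Dict.ext
  rw [PySem.Dict.items_foldl_insert_fresh _ _ _ _
    (fun a _ => PySem.Dict.contains_empty _) (by decide)]
  show _ = List.map (fun i => (PySem.Int.toStr i,
      (nxtDict s.toList).getD (PySem.Int.toStr i) (PySem.Int.toStr i))) (PySem.List.pyRange 1 9 1)
  rw [show PySem.Dict.empty.items = ([] : List (String × String)) from rfl, List.nil_append]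
  refine List.map_congr_left (fun i hi => ?_)
  have hmem : i = 1 ∨ i = 2 ∨ i = 3 ∨ i = 4 ∨ i = 5 ∨ i = 6 ∨ i = 7 ∨ i = 8 := by
    have h9 : PySem.List.pyRange 1 9 1 = [1, 2, 3, 4, 5, 6, 7, 8] := by decide
    rw [h9] at hi; simpa using hi
  rcases hmem with rfl | rfl | rfl | rfl | rfl | rfl | rfl | rfl
  · rw [show PySem.Int.toStr 1 = String.ofList ['1'] from by decide]
    exact congrArg (Prod.mk _) (entry_eq s '1')
  · rw [show PySem.Int.toStr 2 = String.ofList ['2'] from by decide]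
    exact congrArg (Prod.mk _) (entry_eq s '2')
  · rw [show PySem.Int.toStr 3 = String.ofList ['3'] from by decide]
    exact congrArg (Prod.mk _) (entry_eq s '3')
  · rw [show PySem.Int.toStr 4 = String.ofList ['4'] from by decide]
    exact congrArg (Prod.mk _) (entry_eq s '4')
  · rw [show PySem.Int.toStr 5 = String.ofList ['5'] from by decide]
    exact congrArg (Prod.mk _) (entry_eq s '5')
  · rw [show PySem.Int.toStr 6 = String.ofList ['6'] from by decide]
    exact congrArg (Prod.mk _) (entry_eq s '6')
  · rw [show PySem.Int.toStr 7 = String.ofList ['7'] from by decide]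
    exact congrArg (Prod.mk _) (entry_eq s '7')
  · rw [show PySem.Int.toStr 8 = String.ofList ['8'] from by decide]
    exact congrArg (Prod.mk _) (entry_eq s '8')

-- ===== VERDICT (by name: the statement is the Claim_ definition above) =====
theorem parse_spec : Claim_equal_parse := by
  intro s _ _
  unfold Spec_parse
  cases hs : PySem.Str.split? (PySem.Str.replace s "(" "") ")" with
  | none => simp only [parse, parse_alt, hs]
  | some l =>
    cases hr : PySem.List.remove? l "" with
    | none => simp only [parse, parse_alt, hs, hr]
    | some l2 =>
      simp only [parse, parse_alt, hs, hr, PySem.List.foldl_append_singleton_eq_map, List.nil_append]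
      exact List.map_congr_left (fun g _ => by rw [makePerm_eq])
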